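-- pv_equiv track=rewrite | github.com/lilleswing/adventcode | 2023/day12.py | replace_bitstring
-- ===== SOURCE A (Python) =====
-- def replace_bitstring(s, replacements):
--     retval = ""
--     replacement_idx = 0
--     for i, c in enumerate(s):
--         if c == '?':
--             retval += replacements[replacement_idx]
--             replacement_idx += 1
--         else:
--             retval += c
--     return retval
-- ===== SOURCE B (Python) =====
-- def replace_bitstring(s, replacements):
--     parts = s.split('?')
--     pieces = [parts[0]]
--     for i in range(len(parts) - 1):
--         pieces.append(replacements[i])
--         pieces.append(parts[i + 1])
--     return "".join(pieces)
-- ===== Notes on version B (the rewrite author's own statement) =====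
-- stated objective: alternative
-- what changed: B splits s on '?' once and interleaves the fixed segments with positionally indexed replacements joined at the end, instead of A's character-by-character scan with a running replacement counter.
import Mathlib
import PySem

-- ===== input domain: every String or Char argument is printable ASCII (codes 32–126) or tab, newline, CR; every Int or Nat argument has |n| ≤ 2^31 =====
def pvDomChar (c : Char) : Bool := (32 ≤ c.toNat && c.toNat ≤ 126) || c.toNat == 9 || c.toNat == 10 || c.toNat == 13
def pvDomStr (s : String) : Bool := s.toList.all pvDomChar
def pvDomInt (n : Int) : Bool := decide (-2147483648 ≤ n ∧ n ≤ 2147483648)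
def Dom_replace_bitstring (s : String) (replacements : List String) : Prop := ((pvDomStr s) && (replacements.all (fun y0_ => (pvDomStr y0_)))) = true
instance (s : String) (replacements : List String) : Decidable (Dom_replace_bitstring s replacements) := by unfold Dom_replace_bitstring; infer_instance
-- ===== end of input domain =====

-- B replaces A's character-by-character scan (running replacement counter) by split-on-'?' and
-- interleaving the fixed segments with positionally indexed replacements (objective: alternative).


-- ===== PORT A =====
def replace_bitstring (s : String) (replacements : List String) : String :=
  let fin := s.toList.foldl
    (fun (st : List Char × Int) c =>
      if c = '?' then (st.1 ++ (PySem.List.pyGetD replacements st.2 "").toList, st.2 + 1)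
      else (st.1 ++ [c], st.2))
    ([], 0)
  String.mk fin.1

-- ===== PORT B =====
def replace_bitstring_alt (s : String) (replacements : List String) : String :=
  let parts := PySem.Chars.splitOn s.toList ['?']
  let pieces := (PySem.List.pyRange 0 ((parts.length : Int) - 1) 1).foldl
    (fun acc i => acc ++ [(PySem.List.pyGetD replacements i "").toList,
                          PySem.List.pyGetD parts (i + 1) []])
    [PySem.List.pyGetD parts 0 []]
  String.mk (PySem.Chars.join [] pieces)

-- ===== PRECONDITION & SPEC =====
-- Pre_ excludes exactly the inputs with more '?' in s than replacements, on which Python A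
-- raises IndexError (and Python B raises IndexError too).
def Pre_replace_bitstring (s : String) (replacements : List String) : Prop :=
  s.toList.count '?' ≤ replacements.length
instance (s : String) (replacements : List String) : Decidable (Pre_replace_bitstring s replacements) := by unfold Pre_replace_bitstring; infer_instance
def pvWitness_replace_bitstring : String × List String := ("a?b?c", ["x", "yz"])

def Spec_replace_bitstring (s : String) (replacements : List String) (out : String) : Prop := out = replace_bitstring_alt s replacements
instance (s : String) (replacements : List String) (out : String) : Decidable (Spec_replace_bitstring s replacements out) := by unfold Spec_replace_bitstring; infer_instance

-- ===== CLAIM (what is proved, stated in full; the proofs are below) =====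
def Claim_equal_replace_bitstring : Prop := ∀ (s : String) (replacements : List String), Dom_replace_bitstring s replacements → Pre_replace_bitstring s replacements → Spec_replace_bitstring s replacements (replace_bitstring s replacements)

-- ===== LEMMAS AND PROOFS =====

-- the replacement inserted for the k-th '?'
def repAt (reps : List String) (k : Int) : List Char := (PySem.List.pyGetD reps k "").toList

-- reference semantics: the char-level result, next replacement index k
def specA (reps : List String) : List Char → Int → List Char
  | [], _ => []
  | c :: t, k => if c = '?' then repAt reps k ++ specA reps t (k + 1) else c :: specA reps t k

-- structural split on '?': (first piece, later pieces)
def splitQ : List Char → List Char × List (List Char)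
  | [] => ([], [])
  | c :: t => if c = '?' then ([], (splitQ t).1 :: (splitQ t).2)
              else (c :: (splitQ t).1, (splitQ t).2)

-- segments interleaved with replacements starting at index k
def weave (reps : List String) : List (List Char) → Int → List Char
  | [], _ => []
  | p :: pt, k => repAt reps k ++ p ++ weave reps pt (k + 1)

lemma specA_nil (reps : List String) (k : Int) : specA reps [] k = [] := rfl
lemma specA_cons (reps : List String) (c : Char) (t : List Char) (k : Int) :
    specA reps (c :: t) k
      = if c = '?' then repAt reps k ++ specA reps t (k + 1) else c :: specA reps t k := rfl
lemma splitQ_nil : splitQ [] = ([], []) := rfl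
lemma splitQ_cons (c : Char) (t : List Char) :
    splitQ (c :: t) = if c = '?' then ([], (splitQ t).1 :: (splitQ t).2)
                      else (c :: (splitQ t).1, (splitQ t).2) := rfl
lemma weave_nil (reps : List String) (k : Int) : weave reps [] k = [] := rfl
lemma weave_cons (reps : List String) (p : List Char) (pt : List (List Char)) (k : Int) :
    weave reps (p :: pt) k = repAt reps k ++ p ++ weave reps pt (k + 1) := rfl

lemma foldA (reps : List String) : ∀ (cs : List Char) (acc : List Char) (k : Int),
    (List.foldl (fun (st : List Char × Int) c =>
      if c = '?' then (st.1 ++ (PySem.List.pyGetD reps st.2 "").toList, st.2 + 1)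
      else (st.1 ++ [c], st.2)) (acc, k) cs).1 = acc ++ specA reps cs k := by
  intro cs
  induction cs with
  | nil => intro acc k; simp [specA_nil]
  | cons c t ih =>
    intro acc k
    by_cases hc : c = '?' <;>
      simp [List.foldl_cons, hc, specA_cons, ih, repAt, List.append_assoc]

lemma go_eq : ∀ (fuel : Nat) (l cur : List Char) (acc : List (List Char)),
    l.length < fuel →
    PySem.Chars.splitOn.go ['?'] fuel l cur acc
      = acc.reverse ++ ((cur.reverse ++ (splitQ l).1) :: (splitQ l).2) := by
  intro fuel
  induction fuel with
  | zero => intro l cur acc h; exact absurd h (Nat.not_lt_zero _)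
  | succ f ih =>
    intro l cur acc h
    cases l with
    | nil => simp [PySem.Chars.splitOn.go, splitQ_nil]
    | cons c rest =>
      have hr : rest.length < f := by simpa using Nat.lt_of_succ_lt_succ h
      by_cases hc : c = '?'
      · subst hc
        rw [show PySem.Chars.splitOn.go ['?'] (f + 1) ('?' :: rest) cur acc
              = PySem.Chars.splitOn.go ['?'] f rest [] (cur.reverse :: acc) by
            simp [PySem.Chars.splitOn.go, List.isPrefixOf]]
        rw [ih rest [] (cur.reverse :: acc) hr]
        simp [splitQ_cons]
      · have hc' : ¬('?' = c) := fun h' => hc h'.symm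
        rw [show PySem.Chars.splitOn.go ['?'] (f + 1) (c :: rest) cur acc
              = PySem.Chars.splitOn.go ['?'] f rest (c :: cur) acc by
            simp [PySem.Chars.splitOn.go, List.isPrefixOf, hc']]
        rw [ih rest (c :: cur) acc hr]
        simp [splitQ_cons, hc, List.append_assoc]

lemma splitOn_eq (cs : List Char) :
    PySem.Chars.splitOn cs ['?'] = (splitQ cs).1 :: (splitQ cs).2 := by
  have h := go_eq (cs.length + 1) cs [] [] (by omega)
  simpa [PySem.Chars.splitOn] using h

lemma join_nil_eq_flatten : ∀ (xss : List (List Char)), PySem.Chars.join [] xss = xss.flatten := by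
  intro xss
  induction xss with
  | nil => simp [PySem.Chars.join_nil]
  | cons p rest ih =>
    cases rest with
    | nil => simp [PySem.Chars.join_singleton]
    | cons q r => rw [PySem.Chars.join_cons_cons]; simp [ih]

lemma flatten_flatMap_pair {α : Type} (u v : α → List Char) : ∀ (l : List α),
    (l.flatMap (fun i => [u i, v i])).flatten = l.flatMap (fun i => u i ++ v i) := by
  intro l
  induction l with
  | nil => simp
  | cons x t ih => simp [ih]

lemma flat_weave (reps : List String) : ∀ (ps : List (List Char)) (k : Int),
    (List.range ps.length).flatMap (fun j : Nat => repAt reps (k + (j : Int)) ++ ps.getD j [])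
      = weave reps ps k := by
  intro ps
  induction ps with
  | nil => intro k; simp [weave_nil]
  | cons p pt ih =>
    intro k
    rw [List.length_cons, List.range_succ_eq_map]
    have hstep : ∀ j : Nat,
        repAt reps (k + ((j + 1 : Nat) : Int)) ++ (p :: pt).getD (j + 1) []
          = repAt reps ((k + 1) + (j : Int)) ++ pt.getD j [] := by
      intro j
      rw [List.getD_cons_succ]
      congr 2
      push_cast
      ring
    simp only [List.flatMap_cons, List.flatMap_map, Nat.succ_eq_add_one, hstep]
    rw [ih (k + 1)]
    simp [weave_cons]

lemma spec_split (reps : List String) : ∀ (cs : List Char) (k : Int),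
    specA reps cs k = (splitQ cs).1 ++ weave reps (splitQ cs).2 k := by
  intro cs
  induction cs with
  | nil => intro k; rfl
  | cons c t ih =>
    intro k
    by_cases hc : c = '?' <;>
      simp [specA_cons, splitQ_cons, hc, ih, weave_cons, List.append_assoc]

lemma A_eq (s : String) (reps : List String) :
    replace_bitstring s reps = String.mk (specA reps s.toList 0) := by
  simp only [replace_bitstring]
  rw [foldA reps s.toList [] 0]
  simp

lemma B_eq (s : String) (reps : List String) :
    replace_bitstring_alt s reps
      = String.mk ((splitQ s.toList).1 ++ weave reps (splitQ s.toList).2 0) := by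
  simp only [replace_bitstring_alt]
  rw [splitOn_eq]
  rw [PySem.List.foldl_append_eq_flatMap]
  have hm : ((List.length ((splitQ s.toList).1 :: (splitQ s.toList).2) : Int) - 1)
      = (((splitQ s.toList).2.length : Nat) : Int) := by
    push_cast [List.length_cons]; ring
  rw [hm, PySem.List.pyRange_zero_nat]
  have h0 : PySem.List.pyGetD ((splitQ s.toList).1 :: (splitQ s.toList).2) (0 : Int) []
      = (splitQ s.toList).1 := by
    simp
  have hg : ∀ j : Nat,
      ([(PySem.List.pyGetD reps ((j : Nat) : Int) "").toList,
        PySem.List.pyGetD ((splitQ s.toList).1 :: (splitQ s.toList).2) (((j : Nat) : Int) + 1) []] : List (List Char))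
        = [repAt reps ((j : Nat) : Int), (splitQ s.toList).2.getD j []] := by
    intro j
    have h1 : (((j : Nat) : Int) + 1) = (((j + 1 : Nat) : Nat) : Int) := by push_cast; ring
    rw [h1, PySem.List.pyGetD_natCast, PySem.List.pyGetD_natCast, List.getD_cons_succ]
    simp [repAt]
  simp only [List.flatMap_map, hg, h0]
  rw [join_nil_eq_flatten]
  have hw := flat_weave reps (splitQ s.toList).2 0
  simp only [zero_add] at hw
  simp only [List.singleton_append, List.flatten_cons, flatten_flatMap_pair]
  rw [hw]

-- ===== VERDICT (by name: the statement is the Claim_ definition above) =====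
theorem replace_bitstring_spec : Claim_equal_replace_bitstring := by
  intro s reps _ _
  unfold Spec_replace_bitstring
  rw [A_eq, B_eq, spec_split]
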